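-- pv_equiv track=rewrite | github.com/michaelmcguiness/advent-of-code | day8/sherlock_and_anagrams/sherlock_and_anagrams.py | dictOfSubstrings
-- ===== SOURCE A (Python) =====
-- from collections import defaultdict
--
-- def dictOfSubstrings(s):
--     d = defaultdict(lambda: 0)
--     frameSize = len(s) - 1
--     while frameSize > 0:
--         for i in range(len(s) - frameSize + 1):
--             # sort bc letters don't have to be in order for it to count
--             substr = ''.join(sorted(s[i:i + frameSize]))
--             d[substr] += 1
--         frameSize -= 1
--     return d
-- ===== SOURCE B (Python) =====
-- def dictOfSubstrings(s):
--     # Sliding-window 128-slot character counts updated incrementally; each key is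
--     # produced by counting sort instead of sorting every window from scratch.
--     d = {}
--     n = len(s)
--     L = n - 1
--     while L > 0:
--         counts = [0] * 128
--         for ch in s[:L]:
--             counts[ord(ch)] += 1
--         key = ''.join(chr(c) * counts[c] for c in range(128))
--         d[key] = d.get(key, 0) + 1
--         for i in range(1, n - L + 1):
--             counts[ord(s[i - 1])] -= 1
--             counts[ord(s[i + L - 1])] += 1
--             key = ''.join(chr(c) * counts[c] for c in range(128))
--             d[key] = d.get(key, 0) + 1
--         L -= 1
--     return d
-- ===== Notes on version B (the rewrite author's own statement) =====
-- stated objective: alternative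
-- what changed: Instead of extracting and comparison-sorting every substring, B maintains a sliding 128-slot character-count array that is updated in O(1) per window shift and emits each dict key by counting sort.
import Mathlib
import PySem

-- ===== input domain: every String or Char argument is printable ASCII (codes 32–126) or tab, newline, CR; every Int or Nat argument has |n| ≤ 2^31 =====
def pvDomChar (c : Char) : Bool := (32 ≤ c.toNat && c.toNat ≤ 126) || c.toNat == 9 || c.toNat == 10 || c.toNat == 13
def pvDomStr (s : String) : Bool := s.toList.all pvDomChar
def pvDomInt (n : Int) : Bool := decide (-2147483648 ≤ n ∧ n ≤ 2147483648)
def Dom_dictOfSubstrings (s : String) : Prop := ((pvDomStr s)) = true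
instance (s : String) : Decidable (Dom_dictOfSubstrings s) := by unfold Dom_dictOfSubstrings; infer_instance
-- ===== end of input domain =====

-- B replaces A's per-window sort by a sliding 128-slot character-count array updated
-- incrementally, emitting each dict key by counting sort (objective: alternative algorithm).

-- ===== PORT A =====
-- while frameSize > 0: for i in range(len(s)-frameSize+1): d[''.join(sorted(s[i:i+frameSize]))] += 1
def dictOfSubstringsLoopA (cs : List Char) (frameSize : Nat) (d : PySem.Dict String Int) :
    PySem.Dict String Int :=
  match frameSize with
  | 0 => d
  | fs + 1 =>
    let L : Nat := fs + 1
    dictOfSubstringsLoopA cs fs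
      ((PySem.List.pyRange 0 ((cs.length : Int) - (L : Int) + 1) 1).foldl
        (fun d i =>
          d.modify
            (String.ofList (PySem.List.sorted
              (PySem.List.slice cs (some i) (some (i + (L : Int)))) (fun c => c) false))
            0 (· + 1))
        d)

def dictOfSubstrings (s : String) : List (String × Int) :=
  (dictOfSubstringsLoopA s.toList (s.toList.length - 1) PySem.Dict.empty).items

-- ===== PORT B =====
-- ''.join(chr(c) * counts[c] for c in range(128))
def pvAnagramKey (counts : List Int) : String :=
  String.ofList (((List.range 128).map
    (fun c => List.replicate (counts.getD c 0).toNat (Char.ofNat c))).flatten)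

-- d[key] = d.get(key, 0) + 1
def pvBump (d : PySem.Dict String Int) (k : String) : PySem.Dict String Int :=
  d.insert k (d.getD k 0 + 1)

-- one iteration of the inner sliding-window loop of Source B
def pvSlideStep (cs : List Char) (L : Nat)
    (st : List Int × PySem.Dict String Int) (i : Int) :
    List Int × PySem.Dict String Int :=
  let c1 := (PySem.List.pyGetD cs (i - 1) ' ').toNat
  let counts1 := st.1.set c1 (st.1.getD c1 0 - 1)
  let c2 := (PySem.List.pyGetD cs (i + (L : Int) - 1) ' ').toNat
  let counts2 := counts1.set c2 (counts1.getD c2 0 + 1)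
  (counts2, pvBump st.2 (pvAnagramKey counts2))

def dictOfSubstringsLoopB (cs : List Char) (L : Nat) (d : PySem.Dict String Int) :
    PySem.Dict String Int :=
  match L with
  | 0 => d
  | l + 1 =>
    let L : Nat := l + 1
    let counts := (cs.take L).foldl
      (fun cnts ch => cnts.set ch.toNat (cnts.getD ch.toNat 0 + 1))
      (List.replicate 128 0)
    let d1 := pvBump d (pvAnagramKey counts)
    let st := (PySem.List.pyRange 1 ((cs.length : Int) - (L : Int) + 1) 1).foldl
      (pvSlideStep cs L) (counts, d1)
    dictOfSubstringsLoopB cs l st.2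

def dictOfSubstrings_alt (s : String) : List (String × Int) :=
  (dictOfSubstringsLoopB s.toList (s.toList.length - 1) PySem.Dict.empty).items

-- ===== PRECONDITION & SPEC =====
def Spec_dictOfSubstrings (s : String) (out : List (String × Int)) : Prop := out = dictOfSubstrings_alt s
instance (s : String) (out : List (String × Int)) : Decidable (Spec_dictOfSubstrings s out) := by unfold Spec_dictOfSubstrings; infer_instance

-- ===== CLAIM (what is proved, stated in full; the proofs are below) =====
def Claim_equal_dictOfSubstrings : Prop := ∀ (s : String), Dom_dictOfSubstrings s → Spec_dictOfSubstrings s (dictOfSubstrings s)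

-- ===== LEMMAS AND PROOFS =====

-- the 128-slot character-count vector of a window, as a mathematical object
def pvCountsOf (w : List Char) : List Int :=
  (List.range 128).map (fun c => ((w.count (Char.ofNat c) : Nat) : Int))

theorem pvToNat_ofNat (j : Nat) (hj : j < 128) : (Char.ofNat j).toNat = j := by
  simp [Char.toNat_ofNat]; omega

theorem pvOfNat_eq_iff (j : Nat) (hj : j < 128) (c : Char) :
    Char.ofNat j = c ↔ j = c.toNat := by
  constructor
  · rintro rfl; exact (pvToNat_ofNat j hj).symm
  · rintro rfl; exact Char.ofNat_toNat _

theorem pvCountsOf_getD (w : List Char) (c : Nat) (hc : c < 128) :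
    (pvCountsOf w).getD c 0 = ((w.count (Char.ofNat c) : Nat) : Int) := by
  unfold pvCountsOf; exact PySem.List.getD_map_range _ 128 c 0 hc

theorem pvCountsOf_inc (m : List Char) (b : Char) (hb : b.toNat < 128) :
    (pvCountsOf m).set b.toNat ((pvCountsOf m).getD b.toNat 0 + 1) = pvCountsOf (m ++ [b]) := by
  apply List.ext_getElem
  · simp [pvCountsOf]
  · intro j h1 h2
    have hj : j < 128 := by simpa [pvCountsOf] using h2
    rw [List.getElem_set]
    simp only [List.length_set] at h1
    simp only [pvCountsOf_getD m b.toNat hb]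
    simp only [pvCountsOf, List.getElem_map, List.getElem_range]
    by_cases hbj : b.toNat = j
    · subst hbj
      rw [if_pos rfl, Char.ofNat_toNat, List.count_append]
      simp
    · rw [if_neg hbj, List.count_append]
      have hne : ¬ b = Char.ofNat j := by
        intro he; exact hbj (((pvOfNat_eq_iff j hj b).mp he.symm).symm)
      simp [hne]

theorem pvCountsOf_dec (m : List Char) (a : Char) (ha : a.toNat < 128) :
    (pvCountsOf (a :: m)).set a.toNat ((pvCountsOf (a :: m)).getD a.toNat 0 - 1) = pvCountsOf m := by
  apply List.ext_getElem
  · simp [pvCountsOf]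
  · intro j h1 h2
    have hj : j < 128 := by simpa [pvCountsOf] using h2
    rw [List.getElem_set]
    simp only [List.length_set] at h1
    simp only [pvCountsOf_getD _ a.toNat ha]
    simp only [pvCountsOf, List.getElem_map, List.getElem_range]
    by_cases haj : a.toNat = j
    · subst haj
      rw [if_pos rfl, Char.ofNat_toNat, List.count_cons_self]
      push_cast; ring
    · rw [if_neg haj]
      have hne : Char.ofNat j ≠ a := by
        intro he; exact haj (((pvOfNat_eq_iff j hj a).mp he).symm)
      simp [hne.symm]

theorem pvInit_counts (w : List Char) (h : ∀ c ∈ w, c.toNat < 128) : ∀ (v : List Char),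
    w.foldl (fun cnts ch => cnts.set ch.toNat (cnts.getD ch.toNat 0 + 1)) (pvCountsOf v)
      = pvCountsOf (v ++ w) := by
  induction w with
  | nil => intro v; simp
  | cons ch w ih =>
    intro v
    have hch : ch.toNat < 128 := h ch (by simp)
    simp only [List.foldl_cons]
    rw [pvCountsOf_inc v ch hch, ih (fun c hc => h c (by simp [hc])) (v ++ [ch])]
    simp

theorem pvCountsOf_nil : pvCountsOf [] = List.replicate 128 0 := by
  simp [pvCountsOf]

theorem pvCount_flatten (w : List Char) :
    ∀ (n : Nat), n ≤ 128 → ∀ (x : Char),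
    (((List.range n).map (fun c => List.replicate (w.count (Char.ofNat c)) (Char.ofNat c))).flatten).count x
      = if x.toNat < n then w.count x else 0 := by
  intro n
  induction n with
  | zero => intro _ x; simp
  | succ n ih =>
    intro hn x
    rw [List.range_succ, List.map_append, List.flatten_append, List.count_append,
      ih (by omega) x]
    simp only [List.map_cons, List.map_nil, List.flatten_cons, List.flatten_nil,
      List.append_nil, List.count_replicate]
    by_cases hx : x.toNat = n
    · have hxe : Char.ofNat n = x := (pvOfNat_eq_iff n (by omega) x).mpr hx.symm
      rw [if_neg (by omega), if_pos (by simp [hxe]), if_pos (by omega), hxe]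
      simp
    · have hxe : ¬ (Char.ofNat n == x) = true := by
        simp only [beq_iff_eq]
        intro he; exact hx ((pvOfNat_eq_iff n (by omega) x).mp he).symm
      rw [if_neg hxe]
      by_cases hlt : x.toNat < n
      · rw [if_pos hlt, if_pos (by omega)]; omega
      · rw [if_neg hlt, if_neg (by omega)]

theorem pvFlatten_sorted (w : List Char) (h : ∀ c ∈ w, c.toNat < 128) :
    PySem.List.sorted w (fun c => c) false
      = ((List.range 128).map (fun c => List.replicate (w.count (Char.ofNat c)) (Char.ofNat c))).flatten := by
  apply PySem.List.sorted_id_eq_of_perm_of_pairwise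
  · rw [List.perm_iff_count]
    intro x
    rw [pvCount_flatten w 128 (le_refl _) x]
    by_cases hx : x.toNat < 128
    · rw [if_pos hx]
    · rw [if_neg hx, eq_comm, List.count_eq_zero]
      intro hmem; exact hx (h x hmem)
  · rw [List.pairwise_flatten]
    constructor
    · intro l hl
      obtain ⟨c, _, rfl⟩ := List.mem_map.mp hl
      exact List.pairwise_replicate.mpr (Or.inr (le_refl _))
    · rw [List.pairwise_iff_getElem]
      intro i j hi hj hij
      simp only [List.length_map, List.length_range] at hi hj
      intro x hx y hy
      simp only [List.getElem_map, List.getElem_range] at hx hy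
      have hxv := List.eq_of_mem_replicate hx
      have hyv := List.eq_of_mem_replicate hy
      subst hxv; subst hyv
      have hle : (Char.ofNat i).toNat ≤ (Char.ofNat j).toNat := by
        rw [pvToNat_ofNat i hi, pvToNat_ofNat j hj]; omega
      exact Char.le_def.mp hle

theorem pvKey_eq (w : List Char) (h : ∀ c ∈ w, c.toNat < 128) :
    pvAnagramKey (pvCountsOf w) = String.ofList (PySem.List.sorted w (fun c => c) false) := by
  unfold pvAnagramKey
  rw [pvFlatten_sorted w h]
  congr 1

theorem pvBump_eq_modify (d : PySem.Dict String Int) (k : String) :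
    pvBump d k = d.modify k 0 (· + 1) := rfl

-- the sliding inner loop computes the same dict as A's inner loop from index a on,
-- given the count-vector invariant
theorem pvSlide_fold (cs : List Char) (hdom : ∀ c ∈ cs, c.toNat < 128) (L : Nat) (hL : 1 ≤ L) :
    ∀ (k : Nat) (a : Int) (d : PySem.Dict String Int), 1 ≤ a →
    a + k = (cs.length : Int) - (L : Int) + 1 →
    ((PySem.List.pyRange a ((cs.length : Int) - (L : Int) + 1) 1).foldl
        (pvSlideStep cs L) (pvCountsOf ((cs.drop (a - 1).toNat).take L), d)).2
      = (PySem.List.pyRange a ((cs.length : Int) - (L : Int) + 1) 1).foldl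
          (fun d i =>
            d.modify
              (String.ofList (PySem.List.sorted
                (PySem.List.slice cs (some i) (some (i + (L : Int)))) (fun c => c) false))
              0 (· + 1)) d := by
  intro k
  induction k with
  | zero =>
    intro a d ha hk
    rw [PySem.List.pyRange_one_eq_nil (by omega)]
    simp
  | succ k ih =>
    intro a d ha hk
    have hn : a + (L : Int) ≤ (cs.length : Int) := by omega
    rw [PySem.List.pyRange_one_cons (by omega)]
    simp only [List.foldl_cons]
    obtain ⟨na, rfl⟩ : ∃ na : Nat, a = (na : Int) :=
      ⟨a.toNat, (Int.toNat_of_nonneg (by omega)).symm⟩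
    have hna1 : 1 ≤ na := by exact_mod_cast ha
    have hnaL : na + L ≤ cs.length := by exact_mod_cast hn
    obtain ⟨l', rfl⟩ : ∃ l', L = l' + 1 := ⟨L - 1, by omega⟩
    have hidx1 : na - 1 < cs.length := by omega
    have hidx2 : na + l' < cs.length := by omega
    have hsplit : (cs.drop (na - 1)).take (l' + 1)
        = cs[na - 1] :: ((cs.drop na).take l') := by
      have hc : na - 1 + 1 = na := by omega
      rw [List.drop_eq_getElem_cons hidx1, hc, List.take_succ_cons]
    have htail : (cs.drop na).take (l' + 1) = (cs.drop na).take l' ++ [cs[na + l']] := by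
      rw [List.take_add_one]
      congr 1
      rw [List.getElem?_drop, List.getElem?_eq_getElem hidx2]
      rfl
    have hget1 : PySem.List.pyGetD cs ((na : Int) - 1) ' ' = cs[na - 1] := by
      have he : ((na : Int) - 1) = ((na - 1 : Nat) : Int) := by omega
      rw [he, PySem.List.pyGetD_natCast, List.getD_eq_getElem cs ' ' hidx1]
    have hget2 : PySem.List.pyGetD cs ((na : Int) + ((l' + 1 : Nat) : Int) - 1) ' '
        = cs[na + l'] := by
      have he : ((na : Int) + ((l' + 1 : Nat) : Int) - 1) = ((na + l' : Nat) : Int) := by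
        push_cast; ring
      rw [he, PySem.List.pyGetD_natCast, List.getD_eq_getElem cs ' ' hidx2]
    have hstep : pvSlideStep cs (l' + 1)
          (pvCountsOf ((cs.drop ((na : Int) - 1).toNat).take (l' + 1)), d) (na : Int)
        = (pvCountsOf ((cs.drop na).take (l' + 1)),
           pvBump d (pvAnagramKey (pvCountsOf ((cs.drop na).take (l' + 1))))) := by
      have hnat : ((na : Int) - 1).toNat = na - 1 := by omega
      unfold pvSlideStep
      simp only [hnat, hget1, hget2]
      rw [hsplit, pvCountsOf_dec _ _ (hdom _ (List.getElem_mem hidx1)),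
        pvCountsOf_inc _ _ (hdom _ (List.getElem_mem hidx2)), ← htail]
    rw [hstep]
    have hsl : PySem.List.slice cs (some (na : Int)) (some ((na : Int) + ((l' + 1 : Nat) : Int)))
        = (cs.drop na).take (l' + 1) := PySem.List.slice_natCast_add cs na (l' + 1)
    have hw : ∀ c ∈ (cs.drop na).take (l' + 1), c.toNat < 128 := fun c hc =>
      hdom c (List.mem_of_mem_drop (List.mem_of_mem_take hc))
    rw [hsl, pvKey_eq _ hw, pvBump_eq_modify]
    have hrec := ih ((na : Int) + 1)
      ((PySem.Dict.modify d
        (String.ofList (PySem.List.sorted ((cs.drop na).take (l' + 1)) (fun c => c) false))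
        0 (· + 1))) (by omega) (by omega)
    have hidx : (((na : Int) + 1) - 1).toNat = na := by omega
    rw [hidx] at hrec
    exact hrec

theorem pvLoop_eq (cs : List Char) (hdom : ∀ c ∈ cs, c.toNat < 128) :
    ∀ (L : Nat), L ≤ cs.length - 1 → ∀ (d : PySem.Dict String Int),
    dictOfSubstringsLoopB cs L d = dictOfSubstringsLoopA cs L d := by
  intro L
  induction L with
  | zero => intro _ d; rfl
  | succ l ih =>
    intro hle d
    have hn : l + 2 ≤ cs.length := by omega
    rw [dictOfSubstringsLoopB, dictOfSubstringsLoopA]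
    have hinit := pvInit_counts (cs.take (l + 1))
      (fun c hc => hdom c (List.mem_of_mem_take hc)) []
    rw [List.nil_append] at hinit
    rw [← pvCountsOf_nil, hinit]
    have hbound : (0 : Int) < (cs.length : Int) - ((l + 1 : Nat) : Int) + 1 := by
      push_cast; omega
    rw [PySem.List.pyRange_one_cons hbound]
    simp only [List.foldl_cons]
    have hsl0 : PySem.List.slice cs (some (0 : Int)) (some ((0 : Int) + ((l + 1 : Nat) : Int)))
        = cs.take (l + 1) := by
      rw [PySem.List.slice_toNat cs (by omega) (by positivity)]
      simp
    rw [hsl0]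
    have hw : ∀ c ∈ cs.take (l + 1), c.toNat < 128 := fun c hc =>
      hdom c (List.mem_of_mem_take hc)
    rw [pvKey_eq _ hw, pvBump_eq_modify]
    have hsf := pvSlide_fold cs hdom (l + 1) (by omega) (cs.length - (l + 1)) 1
      ((PySem.Dict.modify d
        (String.ofList (PySem.List.sorted (cs.take (l + 1)) (fun c => c) false))
        0 (· + 1))) (by omega) (by push_cast; omega)
    have h0 : (((1 : Int)) - 1).toNat = 0 := by omega
    rw [h0, List.drop_zero] at hsf
    rw [hsf]
    exact ih (by omega) _

-- ===== VERDICT (by name: the statement is the Claim_ definition above) =====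
theorem dictOfSubstrings_spec : Claim_equal_dictOfSubstrings := by
  intro s hdom
  unfold Spec_dictOfSubstrings dictOfSubstrings dictOfSubstrings_alt
  have h : ∀ c ∈ s.toList, c.toNat < 128 := by
    intro c hc
    have := List.all_eq_true.mp hdom c hc
    simp only [pvDomChar, Bool.or_eq_true, Bool.and_eq_true, decide_eq_true_eq, beq_iff_eq] at this
    omega
  rw [pvLoop_eq s.toList h (s.toList.length - 1) (le_refl _)]
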